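-- pv_equiv track=rewrite | github.com/dethmoose/aoc | day3.py | sumPriority
-- ===== SOURCE A (Python) =====
-- import string
--
-- def sumPriority(common_item):
--     if common_item.islower():
--         for i, letter in enumerate(string.ascii_lowercase):
--             if letter == common_item:
--                 return i + 1
--     else:
--         for i, letter in enumerate(string.ascii_uppercase):
--             if letter == common_item:
--                 return i + 27
-- ===== SOURCE B (Python) =====
-- def sumPriority(common_item):
--     if common_item.islower():
--         if len(common_item) == 1 and 'a' <= common_item <= 'z':
--             return ord(common_item) - ord('a') + 1
--     else:
--         if len(common_item) == 1 and 'A' <= common_item <= 'Z':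
--             return ord(common_item) - ord('A') + 27
-- ===== Notes on version B (the rewrite author's own statement) =====
-- stated objective: idiomatic
-- what changed: Replaces the two 26-step alphabet scans with direct ord() arithmetic on a single guarded character.
import Mathlib
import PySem

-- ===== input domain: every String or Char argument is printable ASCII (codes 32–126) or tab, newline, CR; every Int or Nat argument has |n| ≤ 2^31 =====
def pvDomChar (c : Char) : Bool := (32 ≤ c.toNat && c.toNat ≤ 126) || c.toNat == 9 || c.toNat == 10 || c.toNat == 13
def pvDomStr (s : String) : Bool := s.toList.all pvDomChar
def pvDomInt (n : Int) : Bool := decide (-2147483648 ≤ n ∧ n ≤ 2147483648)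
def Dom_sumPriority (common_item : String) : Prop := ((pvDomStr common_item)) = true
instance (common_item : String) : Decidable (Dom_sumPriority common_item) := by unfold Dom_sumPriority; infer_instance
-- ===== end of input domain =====

-- B replaces A's two 26-step alphabet scans by direct ord() arithmetic on a single guarded character (idiomatic, O(1)).

-- ===== PORT A =====
-- Python str.islower(): some cased char, and no cased char is uppercase; exact on the ASCII domain
def pyStrIslower (s : String) : Bool :=
  s.toList.any PySem.Chars.islower && s.toList.all (fun c => !PySem.Chars.isupper c)

def asciiLowercase : List Char := "abcdefghijklmnopqrstuvwxyz".toList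
def asciiUppercase : List Char := "ABCDEFGHIJKLMNOPQRSTUVWXYZ".toList

-- 'for i, letter in enumerate(alphabet): if letter == common_item: return i + off'
def scanA (pairs : List (Int × Char)) (off : Int) (s : String) : Option Int :=
  match pairs with
  | [] => none
  | (i, c) :: rest => if String.ofList [c] = s then some (i + off) else scanA rest off s

def sumPriority (common_item : String) : Option Int :=
  if pyStrIslower common_item then
    scanA (PySem.List.enumerate asciiLowercase 0) 1 common_item
  else
    scanA (PySem.List.enumerate asciiUppercase 0) 27 common_item

-- ===== PORT B =====
def sumPriority_alt (common_item : String) : Option Int :=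
  if pyStrIslower common_item then
    match common_item.toList with
    | [c] => if 'a' ≤ c ∧ c ≤ 'z' then some ((c.toNat : Int) - 97 + 1) else none
    | _ => none
  else
    match common_item.toList with
    | [c] => if 'A' ≤ c ∧ c ≤ 'Z' then some ((c.toNat : Int) - 65 + 27) else none
    | _ => none

-- ===== PRECONDITION & SPEC =====
def Spec_sumPriority (common_item : String) (out : Option Int) : Prop := out = sumPriority_alt common_item
instance (common_item : String) (out : Option Int) : Decidable (Spec_sumPriority common_item out) := by unfold Spec_sumPriority; infer_instance

-- ===== CLAIM (what is proved, stated in full; the proofs are below) =====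
def Claim_equal_sumPriority : Prop := ∀ (common_item : String), Dom_sumPriority common_item → Spec_sumPriority common_item (sumPriority common_item)

-- ===== LEMMAS AND PROOFS =====

theorem scanA_none (pairs : List (Int × Char)) (off : Int) (s : String)
    (h : ∀ c : Char, s ≠ String.ofList [c]) : scanA pairs off s = none := by
  induction pairs with
  | nil => rfl
  | cons p rest ih =>
    obtain ⟨i, c⟩ := p
    simp [scanA, (h c).symm, ih]

theorem not_single (s : String) (h : s.toList.length ≠ 1) : ∀ c : Char, s ≠ String.ofList [c] := by
  intro c hc
  apply h
  rw [hc, String.toList_ofList]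
  rfl

set_option maxRecDepth 4000 in
theorem key_lemma : ∀ n : Nat, n ≤ 126 →
    sumPriority (String.ofList [Char.ofNat n]) = sumPriority_alt (String.ofList [Char.ofNat n]) := by
  decide

-- ===== VERDICT (by name: the statement is the Claim_ definition above) =====
theorem sumPriority_spec : Claim_equal_sumPriority := by
  intro s hdom
  unfold Spec_sumPriority
  by_cases hlen : s.toList.length = 1
  · -- single character: s = String.ofList [c] with c printable ASCII; finite check
    obtain ⟨c, hc⟩ : ∃ c, s.toList = [c] := by
      cases h : s.toList with
      | nil => simp [h] at hlen
      | cons a t =>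
        cases t with
        | nil => exact ⟨a, rfl⟩
        | cons b u => simp [h] at hlen
    have hs : s = String.ofList [c] := by
      have := congrArg String.ofList hc
      simpa [String.ofList_toList] using this
    have hdc : pvDomChar c = true := by
      unfold Dom_sumPriority pvDomStr at hdom
      rw [hc] at hdom
      simpa using hdom
    have hle : c.toNat ≤ 126 := by
      unfold pvDomChar at hdc
      simp at hdc
      omega
    have := key_lemma c.toNat hle
    rw [Char.ofNat_toNat] at this
    rw [hs]
    exact this
  · -- not a single character: both sides are none
    have hne := not_single s hlen
    have ha : sumPriority s = none := by
      unfold sumPriority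
      split <;> exact scanA_none _ _ _ hne
    have hb : sumPriority_alt s = none := by
      unfold sumPriority_alt
      rcases h : s.toList with _ | ⟨a, _ | ⟨b, u⟩⟩
      · split <;> rfl
      · simp [h] at hlen
      · split <;> rfl
    rw [ha, hb]
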